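-- pv_equiv track=rewrite | github.com/wmmcguire/misc-python | bingap.py | binGap
-- ===== SOURCE A (Python) =====
-- def binGap(N):
--
-- 	binstr = str(bin(N)) # convert number to string
-- 	binary = binstr[2:] #0b|xxxxxxxx
--
--
-- 	bingaps = []
-- 	zcnt = 0
--
-- 	for bit in binary:
-- 		if bit != '1':
-- 			zcnt += 1 #count characters that aren't 1, which are zeroes in this case.
-- 		else:
-- 			bingaps.append(zcnt) #append the counted binary gap into the array
-- 			zcnt = 0 # reset the counter
-- 			#when statement finds a 1, it will add onto the array.
-- 	return max(bingaps)
-- ===== SOURCE B (Python) =====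
-- def binGap(N):
--     # Split the binary string on '1': the lengths of all segments except the
--     # last (trailing zeros, which are never closed by a '1') are the gaps.
--     segments = bin(N)[2:].split('1')
--     return max(len(s) for s in segments[:-1])
-- ===== Notes on version B (the rewrite author's own statement) =====
-- stated objective: idiomatic
-- what changed: Replaces the running zero-counter loop with a branch per character by splitting the binary string on '1' and taking the max length of the segments except the trailing one.
-- outside the precondition, e.g. on binGap(0): A raises ValueError, B raises ValueError
import Mathlib
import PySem

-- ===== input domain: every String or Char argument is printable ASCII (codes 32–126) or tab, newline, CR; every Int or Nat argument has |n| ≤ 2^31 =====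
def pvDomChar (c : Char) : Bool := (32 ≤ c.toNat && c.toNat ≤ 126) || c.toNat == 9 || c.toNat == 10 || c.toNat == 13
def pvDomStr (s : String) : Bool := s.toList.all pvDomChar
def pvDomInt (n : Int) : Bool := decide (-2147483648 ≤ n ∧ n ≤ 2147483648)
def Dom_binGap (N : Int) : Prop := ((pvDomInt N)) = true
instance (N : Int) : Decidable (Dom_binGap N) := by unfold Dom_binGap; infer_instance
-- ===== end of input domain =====

-- B replaces the per-character counter loop by splitting the binary string on '1'
-- and taking the max segment length (idiomatic; same return value, both raise only at N = 0).

-- ===== PORT A =====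
-- binary digits of n (most significant first); empty for 0 — the recursion inside Python's bin()
def pyBits (n : Nat) : List Char :=
  if h : n = 0 then [] else pyBits (n / 2) ++ [if n % 2 == 1 then '1' else '0']
decreasing_by exact Nat.div_lt_self (Nat.pos_of_ne_zero h) (by norm_num)

-- str(bin(N)) as a list of chars ("0b…" / "-0b…" / "0b0"), exact for every Int
def pyBinChars (N : Int) : List Char :=
  if N < 0 then '-' :: '0' :: 'b' :: pyBits (-N).toNat
  else if N = 0 then ['0', 'b', '0']
  else '0' :: 'b' :: pyBits N.toNat

-- the body of A's for-loop: state = (bingaps, zcnt)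
def binGapStep (st : List Int × Int) (bit : Char) : List Int × Int :=
  if bit ≠ '1' then (st.1, st.2 + 1) else (st.1 ++ [st.2], 0)

def binGap (N : Int) : Int :=
  let binstr := pyBinChars N
  let binary := PySem.List.slice binstr (some 2) none
  let st := binary.foldl binGapStep ([], 0)
  ((PySem.List.max? st.1 (fun x => x)).getD 0)   -- max(bingaps); none (ValueError) only outside Pre_

-- ===== PORT B =====
def binGap_alt (N : Int) : Int :=
  let binary := PySem.List.slice (pyBinChars N) (some 2) none
  let segments := List.splitOn '1' binary                      -- bin(N)[2:].split('1')
  let gaps := (PySem.List.slice segments none (some (-1))).map (fun s => (s.length : Int))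
  (PySem.List.max? gaps (fun x => x)).getD 0                   -- max(...); none (ValueError) only outside Pre_

-- ===== PRECONDITION & SPEC =====
-- N = 0 is excluded: there bin(N)[2:] contains no '1', so both A and B call max on an empty sequence and raise ValueError.
def Pre_binGap (N : Int) : Prop := N ≠ 0
instance (N : Int) : Decidable (Pre_binGap N) := by unfold Pre_binGap; infer_instance
def pvWitness_binGap : Int := 9

def Spec_binGap (N : Int) (out : Int) : Prop := out = binGap_alt N
instance (N : Int) (out : Int) : Decidable (Spec_binGap N out) := by unfold Spec_binGap; infer_instance

-- ===== CLAIM (what is proved, stated in full; the proofs are below) =====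
def Claim_equal_binGap : Prop := ∀ (N : Int), Dom_binGap N → Pre_binGap N → Spec_binGap N (binGap N)

-- ===== LEMMAS AND PROOFS =====

-- the gap list a '0+'-match produces when the head segment gets counter 0
theorem map_len_match (M : List (List Char)) :
    (match M with
      | [] => ([] : List Int)
      | s :: rest => ((0 : Int) + s.length) :: rest.map (fun t => (t.length : Int)))
    = M.map (fun t => (t.length : Int)) := by
  cases M with
  | nil => rfl
  | cons s rest => simp

-- A's loop state characterised by splitOnP: the gaps appended are the lengths of the
-- segments before each '1', the head segment extended by the incoming counter z.
theorem loop_fst (cs : List Char) : ∀ (acc : List Int) (z : Int),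
    (cs.foldl binGapStep (acc, z)).1 =
      acc ++ (match (List.splitOnP (· == '1') cs).dropLast with
        | [] => ([] : List Int)
        | s :: rest => (z + s.length) :: rest.map (fun t => (t.length : Int))) := by
  induction cs with
  | nil => intro acc z; simp [List.splitOnP_nil]
  | cons c cs ih =>
    intro acc z
    have hne := List.splitOnP_ne_nil (· == '1') cs
    obtain ⟨s, rest, hL⟩ : ∃ s rest, List.splitOnP (· == '1') cs = s :: rest := by
      cases h : List.splitOnP (· == '1') cs with
      | nil => exact absurd h hne
      | cons a b => exact ⟨a, b, rfl⟩
    by_cases hc : c = '1'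
    · subst hc
      simp only [List.foldl_cons, binGapStep, List.splitOnP_cons]
      rw [if_neg (by simp), if_pos (by simp), ih (acc ++ [z]) 0,
        List.dropLast_cons_of_ne_nil (hL ▸ List.cons_ne_nil s rest), map_len_match]
      simp
    · simp only [List.foldl_cons, binGapStep, List.splitOnP_cons]
      rw [if_pos (by simpa using hc), if_neg (by simpa using hc), ih acc (z + 1), hL,
        List.modifyHead_cons]
      cases rest with
      | nil => simp
      | cons r rs =>
        rw [List.dropLast_cons_of_ne_nil (List.cons_ne_nil r rs),
            List.dropLast_cons_of_ne_nil (List.cons_ne_nil r rs)]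
        simp only [List.length_cons]
        congr 2
        push_cast
        ring

-- ===== VERDICT (by name: the statement is the Claim_ definition above) =====
theorem binGap_spec : Claim_equal_binGap := by
  intro N _ _
  unfold Spec_binGap binGap binGap_alt
  simp only [PySem.List.slice_to_neg_one]
  rw [loop_fst _ [] 0, map_len_match]
  simp [List.splitOn]
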